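-- pv_equiv track=rewrite | github.com/SubinJin/Atom | Programmers/049_위장.py | solution
-- ===== SOURCE A (Python) =====
-- def solution(clothes):
--     answer = 0
--     kinds = []
--     cnt = []
--     ans = 1
--     for i in range(len(clothes)) :
--         kinds.append(clothes[i][1])
--     kinds2 = set(kinds)
--     kinds2 = list(kinds2)
--     for i in range(len(kinds2)) :
--         cnt.append(kinds.count(kinds2[i]))
--     for i in range(len(cnt)) :
--         ans *= (cnt[i] + 1)
--     answer = ans - 1
--     return answer
-- ===== SOURCE B (Python) =====
-- def solution(clothes):
--     ks = sorted(c[1] for c in clothes)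
--     ans = 1
--     run = 0
--     prev = None
--     for k in ks:
--         if k == prev:
--             run += 1
--         else:
--             ans *= run + 1
--             run = 1
--             prev = k
--     return ans * (run + 1) - 1
-- ===== Notes on version B (the rewrite author's own statement) =====
-- stated objective: alternative
-- what changed: Replaces A's tally passes (collect kinds, list(set(...)), an O(n) list.count per distinct category, then a product loop) with sorting the category names once and multiplying (run length + 1) over maximal runs of equal adjacent names in a single scan.
import Mathlib
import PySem

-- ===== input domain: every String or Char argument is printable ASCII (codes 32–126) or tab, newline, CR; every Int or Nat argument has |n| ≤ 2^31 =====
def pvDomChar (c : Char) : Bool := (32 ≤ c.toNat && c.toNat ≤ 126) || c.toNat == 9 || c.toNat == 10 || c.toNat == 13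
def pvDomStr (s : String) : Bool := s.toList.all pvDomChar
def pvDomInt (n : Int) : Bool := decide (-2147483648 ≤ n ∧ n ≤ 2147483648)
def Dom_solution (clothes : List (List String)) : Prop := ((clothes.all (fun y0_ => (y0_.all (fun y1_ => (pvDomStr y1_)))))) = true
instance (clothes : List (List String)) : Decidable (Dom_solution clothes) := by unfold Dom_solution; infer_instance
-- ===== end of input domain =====

-- B sorts the category names and multiplies (run length + 1) over the runs of equal
-- adjacent categories in one scan, instead of A's set-of-kinds plus an O(n) list.count
-- per distinct category: a different algorithm (sort + run-length scan vs tally passes).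

-- ===== PORT A =====
-- the three loops of A, one helper each
def kindsA (clothes : List (List String)) : List String :=
  (PySem.List.pyRange 0 (clothes.length : Int) 1).foldl
    (fun ks i => ks ++ [PySem.List.pyGetD (PySem.List.pyGetD clothes i []) 1 ""]) []

def cntA (kinds kinds2 : List String) : List Int :=
  (PySem.List.pyRange 0 (kinds2.length : Int) 1).foldl
    (fun cs i => cs ++ [(kinds.count (PySem.List.pyGetD kinds2 i "") : Int)]) []

def ansA (cnt : List Int) : Int :=
  (PySem.List.pyRange 0 (cnt.length : Int) 1).foldl
    (fun a i => a * (PySem.List.pyGetD cnt i 0 + 1)) 1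

def solution (clothes : List (List String)) : Int :=
  let kinds := kindsA clothes
  let kinds2 : List String := PySem.Set.ofList kinds
  let cnt := cntA kinds kinds2
  let ans := ansA cnt
  ans - 1

-- ===== PORT B =====
-- state (prev, ans, run); one step of the scan over the sorted category list
def stepB (st : Option String × Int × Int) (k : String) : Option String × Int × Int :=
  if st.1 = some k then (st.1, st.2.1, st.2.2 + 1)
  else (some k, st.2.1 * (st.2.2 + 1), 1)

def solution_alt (clothes : List (List String)) : Int :=
  let ks := PySem.List.sorted (clothes.map (fun c => PySem.List.pyGetD c 1 "")) (fun x => x) false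
  let st := ks.foldl stepB ((none : Option String), (1 : Int), (0 : Int))
  st.2.1 * (st.2.2 + 1) - 1

-- ===== PRECONDITION & SPEC =====
-- Pre_ excludes exactly the inputs where Python A raises IndexError: an inner list with
-- fewer than two elements (clothes[i][1]).  B raises there too.
def Pre_solution (clothes : List (List String)) : Prop :=
  ∀ c ∈ clothes, 2 ≤ c.length
instance (clothes : List (List String)) : Decidable (Pre_solution clothes) := by
  unfold Pre_solution; infer_instance
def pvWitness_solution : List (List String) :=
  [["a", "shirt"], ["b", "shirt"], ["c", "pants"]]

def Spec_solution (clothes : List (List String)) (out : Int) : Prop := out = solution_alt clothes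
instance (clothes : List (List String)) (out : Int) : Decidable (Spec_solution clothes out) := by unfold Spec_solution; infer_instance

-- ===== CLAIM (what is proved, stated in full; the proofs are below) =====
def Claim_equal_solution : Prop := ∀ (clothes : List (List String)), Dom_solution clothes → Pre_solution clothes → Spec_solution clothes (solution clothes)

-- ===== LEMMAS AND PROOFS =====

-- the order-independent value both programs compute: ∏ over distinct kinds of (count + 1)
def prodP (ys : List String) : Int :=
  ((PySem.Set.ofList ys).map (fun k => (ys.count k : Int) + 1)).prod

theorem kindsA_eq (clothes : List (List String)) :
    kindsA clothes = clothes.map (fun c => PySem.List.pyGetD c 1 "") := by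
  unfold kindsA
  rw [PySem.List.foldl_pyRange_zero_pyGetD' clothes []
        (fun ks c => ks ++ [PySem.List.pyGetD c 1 ""]) [],
      PySem.List.foldl_append_singleton_eq_map, List.nil_append]

theorem cntA_eq (kinds kinds2 : List String) :
    cntA kinds kinds2 = kinds2.map (fun k => (kinds.count k : Int)) := by
  unfold cntA
  rw [PySem.List.foldl_pyRange_zero_pyGetD' kinds2 ""
        (fun cs k => cs ++ [(kinds.count k : Int)]) [],
      PySem.List.foldl_append_singleton_eq_map, List.nil_append]

theorem ansA_eq (cnt : List Int) :
    ansA cnt = cnt.foldl (fun a x => a * (x + 1)) 1 := by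
  unfold ansA
  rw [PySem.List.foldl_pyRange_zero_pyGetD' cnt 0 (fun a x => a * (x + 1)) 1]

theorem foldl_mul_succ (l : List Int) :
    l.foldl (fun a x => a * (x + 1)) 1 = (l.map (fun x => x + 1)).prod := by
  rw [List.prod_eq_foldl, List.foldl_map]

theorem solution_eq_prodP (clothes : List (List String)) :
    solution clothes = prodP (clothes.map (fun c => PySem.List.pyGetD c 1 "")) - 1 := by
  simp only [solution, prodP]
  rw [kindsA_eq, cntA_eq, ansA_eq, foldl_mul_succ, List.map_map]
  rfl

theorem add_cons (s : List String) (x y : String) :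
    PySem.Set.add (x :: s) y = if y = x then x :: s else x :: PySem.Set.add s y := by
  by_cases h : y = x
  · subst h; simp [PySem.Set.add, PySem.Set.contains]
  · by_cases hs : y ∈ s
    · simp [PySem.Set.add, PySem.Set.contains, h, hs]
    · simp [PySem.Set.add, PySem.Set.contains, h, hs]

-- set(x :: t) keeps x first; the remaining distinct elements ignore further copies of x
theorem foldl_add_cons (t : List String) (s : List String) (x : String) :
    List.foldl PySem.Set.add (x :: s) t
      = x :: List.foldl PySem.Set.add s (t.filter (fun y => y ≠ x)) := by
  induction t generalizing s with
  | nil => simp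
  | cons y t ih =>
    simp only [List.foldl_cons, List.filter_cons]
    by_cases h : y = x
    · subst h; rw [add_cons]; simp [ih]
    · rw [add_cons]; simp [h, ih]

theorem prodP_cons (x : String) (t : List String) :
    prodP (x :: t) = (((x :: t).count x : Int) + 1) * prodP (t.filter (fun y => y ≠ x)) := by
  have hof : PySem.Set.ofList (x :: t)
      = x :: PySem.Set.ofList (t.filter (fun y => y ≠ x)) := by
    rw [PySem.Set.ofList_eq_foldl, PySem.Set.ofList_eq_foldl, List.foldl_cons]
    have : PySem.Set.add ([] : List String) x = [x] := by
      simp [PySem.Set.add, PySem.Set.contains]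
    rw [this, foldl_add_cons]
  simp only [prodP, hof, List.map_cons, List.prod_cons]
  have hm := List.map_congr_left (l := PySem.Set.ofList (t.filter (fun y => y ≠ x)))
    (f := fun k => ((x :: t).count k : Int) + 1)
    (g := fun k => ((t.filter (fun y => y ≠ x)).count k : Int) + 1) (fun k hk => ?_)
  · rw [hm]
  have hkmem : k ∈ t.filter (fun y => y ≠ x) := (PySem.Set.mem_ofList _ _).1 hk
  have hkx : k ≠ x := by
    have := List.of_mem_filter hkmem
    simpa using this
  beta_reduce
  rw [List.count_filter (p := fun y => decide (y ≠ x)) (by simpa using hkx)]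
  simp [Ne.symm hkx]

theorem not_mem_of_head_ne (b y : String) (t : List String)
    (hp : (y :: t).Pairwise (· ≤ ·)) (hb : ∀ x ∈ y :: t, b ≤ x) (h : b ≠ y) :
    b ∉ y :: t := by
  intro hmem
  rcases List.mem_cons.1 hmem with h' | h'
  · exact h h'
  · have hyb : y ≤ b := (List.pairwise_cons.1 hp).1 b h'
    have hby : b ≤ y := hb y (List.mem_cons_self)
    exact h (le_antisymm hby hyb)

-- the run-length scan from a state whose remembered category is ≤ everything still to come
theorem scan_some (ys : List String) (hs : ys.Pairwise (· ≤ ·)) :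
    ∀ (b : String) (A r : Int), (∀ x ∈ ys, b ≤ x) →
      (ys.foldl stepB (some b, A, r)).2.1 * ((ys.foldl stepB (some b, A, r)).2.2 + 1)
        = A * (r + 1 + ys.count b) * prodP (ys.filter (fun y => y ≠ b)) := by
  induction ys with
  | nil => intro b A r _; simp [prodP, PySem.Set.ofList, PySem.Set.empty]
  | cons y t ih =>
    intro b A r hb
    by_cases h : b = y
    · subst h
      have hstep : stepB (some b, A, r) b = (some b, A, r + 1) := by
        simp [stepB]
      have hf : (b :: t).filter (fun y => y ≠ b) = t.filter (fun y => y ≠ b) := by simp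
      rw [List.foldl_cons, hstep,
          ih (List.pairwise_cons.1 hs).2 b A (r + 1)
            (fun x hx => hb x (List.mem_cons_of_mem _ hx)),
          List.count_cons_self, hf]
      push_cast
      ring
    · have hnot : b ∉ y :: t := not_mem_of_head_ne b y t hs hb h
      have hstep : stepB (some b, A, r) y = (some y, A * (r + 1), 1) := by
        have hne : ¬ some b = some y := by simpa using h
        simp [stepB, hne]
      have hcount : (y :: t).count b = 0 := List.count_eq_zero.2 hnot
      have hfilter : (y :: t).filter (fun z => z ≠ b) = y :: t := by
        apply List.filter_eq_self.2
        intro a ha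
        simp only [ne_eq, decide_eq_true_eq]
        intro hab
        exact hnot (hab ▸ ha)
      rw [List.foldl_cons, hstep,
          ih (List.pairwise_cons.1 hs).2 y (A * (r + 1)) 1
            (fun x hx => (List.pairwise_cons.1 hs).1 x hx),
          hcount, hfilter, prodP_cons]
      simp only [List.count_cons_self]
      push_cast
      ring

theorem scan_eq_prodP (ys : List String) (hs : ys.Pairwise (· ≤ ·)) :
    (ys.foldl stepB (none, 1, 0)).2.1 * ((ys.foldl stepB (none, 1, 0)).2.2 + 1)
      = prodP ys := by
  cases ys with
  | nil => simp [prodP, PySem.Set.ofList, PySem.Set.empty]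
  | cons b t =>
    have hstep : stepB (none, 1, 0) b = (some b, 1 * (0 + 1), 1) := by simp [stepB]
    rw [List.foldl_cons, hstep,
        scan_some t (List.pairwise_cons.1 hs).2 b (1 * (0 + 1)) 1
          (fun x hx => (List.pairwise_cons.1 hs).1 x hx),
        prodP_cons]
    simp only [List.count_cons_self]
    push_cast
    ring

theorem prodP_perm (xs ys : List String) (h : xs.Perm ys) : prodP xs = prodP ys := by
  have hset : (PySem.Set.ofList xs).Perm (PySem.Set.ofList ys) :=
    (List.perm_ext_iff_of_nodup (PySem.Set.nodup_ofList xs) (PySem.Set.nodup_ofList ys)).2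
      (fun a => by
        rw [PySem.Set.mem_ofList, PySem.Set.mem_ofList]
        exact h.mem_iff)
  calc prodP xs
      = ((PySem.Set.ofList xs).map (fun k => (ys.count k : Int) + 1)).prod := by
        unfold prodP
        congr 1
        apply List.map_congr_left
        intro k _
        rw [h.count_eq]
    _ = prodP ys := (hset.map _).prod_eq

-- ===== VERDICT (by name: the statement is the Claim_ definition above) =====
theorem solution_spec : Claim_equal_solution := by
  intro clothes _ _
  simp only [Spec_solution, solution_alt]
  have hpw : (PySem.List.sorted (clothes.map (fun c => PySem.List.pyGetD c 1 ""))
      (fun x => x) false).Pairwise (· ≤ ·) := by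
    have h := PySem.List.sorted_pairwise
      (xs := clothes.map (fun c => PySem.List.pyGetD c 1 "")) (key := fun x => x)
    simpa using h
  rw [solution_eq_prodP, scan_eq_prodP _ hpw,
      prodP_perm _ _ (PySem.List.sorted_perm _ _ _)]
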